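-- pv_equiv track=rewrite | github.com/bbbii/algorithm-for-coding-test | program/level1/x만큼 간격이 있는 n개의 숫자.py | solution
-- ===== SOURCE A (Python) =====
-- def solution(x, n):
--     answer = []
--     if x > 0:
--         for i in range(x, x*n + 1 , x):
--             answer.append(i)
--     elif x < 0:
--         for i in range(x, x*n - 1, x):
--             answer.append(i)
--     else:
--         return [0]*n
--     return answer
-- ===== SOURCE B (Python) =====
-- def solution(x, n):
--     return [x * i for i in range(1, n + 1)]
-- ===== Notes on version B (the rewrite author's own statement) =====
-- stated objective: simpler
-- what changed: Replaces A's three-way sign branching (stepping range(x, x*n+-1, x) or a [0]*n special case) with one branchless pass that multiplies the index: x*i for i in 1..n.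
import Mathlib
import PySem

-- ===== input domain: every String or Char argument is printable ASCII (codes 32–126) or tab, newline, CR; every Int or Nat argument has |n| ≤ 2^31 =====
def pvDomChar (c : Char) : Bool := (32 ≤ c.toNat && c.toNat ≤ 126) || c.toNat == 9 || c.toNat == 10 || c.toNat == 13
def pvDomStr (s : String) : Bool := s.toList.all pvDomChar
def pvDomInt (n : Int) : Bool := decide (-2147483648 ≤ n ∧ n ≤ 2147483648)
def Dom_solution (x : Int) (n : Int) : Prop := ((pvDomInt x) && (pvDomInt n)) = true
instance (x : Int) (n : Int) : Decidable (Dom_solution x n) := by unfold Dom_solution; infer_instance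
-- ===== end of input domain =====

-- B replaces A's three-way sign branching with one branchless index-multiplication pass (simpler).

-- ===== PORT A =====
-- literal port of A: branch on the sign of x, step a range by x and append each element
def solution (x : Int) (n : Int) : List Int :=
  if x > 0 then
    (PySem.List.pyRange x (x * n + 1) x).foldl (fun answer i => answer ++ [i]) []
  else if x < 0 then
    (PySem.List.pyRange x (x * n - 1) x).foldl (fun answer i => answer ++ [i]) []
  else
    List.replicate n.toNat 0   -- [0]*n (empty for n ≤ 0)

-- ===== PORT B =====
-- literal port of B: [x * i for i in range(1, n + 1)]
def solution_alt (x : Int) (n : Int) : List Int :=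
  (PySem.List.pyRange 1 (n + 1) 1).map (fun i => x * i)

-- ===== PRECONDITION & SPEC =====
def Spec_solution (x : Int) (n : Int) (out : List Int) : Prop := out = solution_alt x n
instance (x : Int) (n : Int) (out : List Int) : Decidable (Spec_solution x n out) := by unfold Spec_solution; infer_instance

-- ===== CLAIM (what is proved, stated in full; the proofs are below) =====
def Claim_equal_solution : Prop := ∀ (x : Int) (n : Int), Dom_solution x n → Spec_solution x n (solution x n)

-- ===== LEMMAS AND PROOFS =====

-- the append-accumulator loop is the identity
theorem pvFoldlAppend (l acc : List Int) :
    l.foldl (fun answer i => answer ++ [i]) acc = acc ++ l := by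
  induction l generalizing acc with
  | nil => simp
  | cons a t ih => simp [List.foldl, ih]

-- B's list in closed form
theorem pvAltEq (x n : Int) :
    solution_alt x n = (List.range n.toNat).map (fun (k : Nat) => x + x * (k : Int)) := by
  unfold solution_alt
  rw [PySem.List.pyRange_one, List.map_map]
  have h : ((n + 1 - 1 : Int)).toNat = n.toNat := by omega
  rw [h]
  refine List.map_congr_left ?_
  intro k _
  simp [Function.comp]
  ring

-- A's ascending range in closed form
theorem pvRangePos (x n : Int) (hx : 0 < x) :
    PySem.List.pyRange x (x * n + 1) x = (List.range n.toNat).map (fun (k : Nat) => x + x * (k : Int)) := by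
  unfold PySem.List.pyRange
  rw [if_neg (by omega)]
  by_cases hn : 1 ≤ n
  · have hlt : x < x * n + 1 := by nlinarith
    have hc : x * n + 1 - x + x - 1 = x * n := by ring
    rw [if_pos hx, if_pos hlt, hc, Int.mul_ediv_cancel_left _ (by omega)]
  · have hlt : ¬ x < x * n + 1 := by nlinarith
    have h0 : n.toNat = 0 := by omega
    rw [if_pos hx, if_neg hlt, h0]

-- A's descending range in closed form
theorem pvRangeNeg (x n : Int) (hx : x < 0) :
    PySem.List.pyRange x (x * n - 1) x = (List.range n.toNat).map (fun (k : Nat) => x + x * (k : Int)) := by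
  unfold PySem.List.pyRange
  rw [if_neg (by omega)]
  by_cases hn : 1 ≤ n
  · have hlt : x * n - 1 < x := by nlinarith
    have hc : x - (x * n - 1) + -x - 1 = -x * n := by ring
    rw [if_neg (by omega), if_pos hlt, hc, Int.mul_ediv_cancel_left _ (by omega)]
  · have hlt : ¬ x * n - 1 < x := by nlinarith
    have h0 : n.toNat = 0 := by omega
    rw [if_neg (by omega), if_neg hlt, h0]

-- ===== VERDICT (by name: the statement is the Claim_ definition above) =====
theorem solution_spec : Claim_equal_solution := by
  intro x n _
  show solution x n = solution_alt x n
  rw [pvAltEq]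
  unfold solution
  rcases lt_trichotomy x 0 with hx | hx | hx
  · rw [if_neg (by omega), if_pos hx, pvFoldlAppend, pvRangeNeg x n hx, List.nil_append]
  · subst hx
    rw [if_neg (by omega), if_neg (by omega)]
    have h : (fun (k : Nat) => (0 : Int) + 0 * (k : Int)) = fun _ => (0 : Int) := by
      funext k; ring
    rw [h, List.map_const', List.length_range]
  · rw [if_pos hx, pvFoldlAppend, pvRangePos x n hx, List.nil_append]
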